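-- pv_equiv track=rewrite | github.com/oscarvalenzuelab/DNSMeshProtocol | dmp/core/dns.py | validate_domain
-- ===== SOURCE A (Python) =====
-- def validate_domain(domain: str) -> bool:
--     """Validate that domain name is DNS-compliant"""
--     if not domain or len(domain) > 253:
--         return False
--
--     labels = domain.split(".")
--     for label in labels:
--         if not label or len(label) > 63:
--             return False
--         # Check for valid characters (alphanumeric and hyphen)
--         if not all(c.isalnum() or c == "-" for c in label):
--             return False
--         # Cannot start or end with hyphen
--         if label.startswith("-") or label.endswith("-"):
--             return False
--
--     return True
-- ===== SOURCE B (Python) =====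
-- def validate_domain(domain: str) -> bool:
--     """Validate that domain name is DNS-compliant (single pass, no split)."""
--     if not domain or len(domain) > 253:
--         return False
--     lab = 0          # length of the current label so far
--     prev = ""        # previous character ("" at the very start)
--     for c in domain:
--         if c == ".":
--             if lab == 0 or prev == "-":
--                 return False
--             lab = 0
--         else:
--             if not (c.isalnum() or c == "-"):
--                 return False
--             if lab == 0 and c == "-":
--                 return False
--             lab += 1
--             if lab > 63:
--                 return False
--         prev = c
--     return lab != 0 and prev != "-"
-- ===== Notes on version B (the rewrite author's own statement) =====
-- stated objective: alternative
-- what changed: Replaced the split-on-dots plus per-label checking loop (which materialises a list of label strings) by a single pass over the characters that tracks the current label length and the previous character, finalising each label at every separator and at the end.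
import Mathlib
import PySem

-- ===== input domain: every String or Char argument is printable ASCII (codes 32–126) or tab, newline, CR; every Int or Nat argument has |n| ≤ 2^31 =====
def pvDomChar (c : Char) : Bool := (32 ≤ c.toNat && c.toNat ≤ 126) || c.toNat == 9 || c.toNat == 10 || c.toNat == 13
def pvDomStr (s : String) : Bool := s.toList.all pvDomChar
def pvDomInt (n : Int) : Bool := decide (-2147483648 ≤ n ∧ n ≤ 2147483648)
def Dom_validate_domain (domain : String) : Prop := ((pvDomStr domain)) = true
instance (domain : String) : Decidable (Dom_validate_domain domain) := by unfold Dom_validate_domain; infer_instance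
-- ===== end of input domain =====

-- B replaces A's split-then-check-each-label algorithm by a single pass over the
-- characters tracking the current label length and the previous character
-- (objective: alternative — no intermediate list of labels is built).

-- ===== PORT A =====
-- the for-loop over the labels, with its early returns
def validate_domain_loop : List (List Char) → Bool
  | [] => true
  | label :: rest =>
    if label = [] ∨ 63 < PySem.Chars.len label then false
    else if !(label.all (fun c => PySem.Chars.isalnum c || c == '-')) then false
    else if PySem.Chars.startswith label ['-'] || PySem.Chars.endswith label ['-'] then false
    else validate_domain_loop rest

def validate_domain (domain : String) : Bool :=
  if domain.toList = [] ∨ 253 < PySem.Str.len domain then false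
  else validate_domain_loop (PySem.Chars.splitOn domain.toList ['.'])

-- ===== PORT B =====
-- the single-pass char loop; prev = "" is ported as none, a one-char prev as some c
def validate_domain_alt_loop : List Char → Nat → Option Char → Bool
  | [], lab, prev => decide (lab ≠ 0) && !(prev == some '-')
  | c :: cs, lab, prev =>
    if c == '.' then
      if lab == 0 || prev == some '-' then false
      else validate_domain_alt_loop cs 0 (some c)
    else
      if !(PySem.Chars.isalnum c || c == '-') then false
      else if lab == 0 && c == '-' then false
      else if 63 < lab + 1 then false
      else validate_domain_alt_loop cs (lab + 1) (some c)

def validate_domain_alt (domain : String) : Bool :=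
  if domain.toList = [] ∨ 253 < PySem.Str.len domain then false
  else validate_domain_alt_loop domain.toList 0 none

-- ===== PRECONDITION & SPEC =====
def Spec_validate_domain (domain : String) (out : Bool) : Prop := out = validate_domain_alt domain
instance (domain : String) (out : Bool) : Decidable (Spec_validate_domain domain out) := by unfold Spec_validate_domain; infer_instance

-- ===== CLAIM (what is proved, stated in full; the proofs are below) =====
def Claim_equal_validate_domain : Prop := ∀ (domain : String), Dom_validate_domain domain → Spec_validate_domain domain (validate_domain domain)

-- ===== LEMMAS AND PROOFS =====

-- a simple structural recursion computing s.split('.')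
def pvSplit : List Char → List (List Char)
  | [] => [[]]
  | c :: cs => if c = '.' then [] :: pvSplit cs else (pvSplit cs).modifyHead (c :: ·)

lemma pvSplit_ne_nil (cs : List Char) : pvSplit cs ≠ [] := by
  induction cs with
  | nil => simp [pvSplit]
  | cons c cs ih =>
    simp only [pvSplit]
    split
    · simp
    · cases h : pvSplit cs with
      | nil => exact absurd h ih
      | cons a as => simp

lemma splitOn_go_eq (fuel : Nat) (l cur : List Char) (acc : List (List Char))
    (h : l.length ≤ fuel) :
    PySem.Chars.splitOn.go ['.'] fuel l cur acc
      = acc.reverse ++ (pvSplit l).modifyHead (cur.reverse ++ ·) := by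
  induction fuel generalizing l cur acc with
  | zero =>
    interval_cases hl : l.length
    have : l = [] := List.length_eq_zero_iff.mp hl
    subst this
    simp [PySem.Chars.splitOn.go, pvSplit]
  | succ fuel ih =>
    cases l with
    | nil => simp [PySem.Chars.splitOn.go, pvSplit]
    | cons c rest =>
      simp only [PySem.Chars.splitOn.go]
      by_cases hc : c = '.'
      · subst hc
        have hpre : List.isPrefixOf ['.'] ('.' :: rest) = true := by
          simp [List.isPrefixOf]
        rw [if_pos hpre]
        have := ih rest [] (cur.reverse :: acc) (by simpa using Nat.le_of_succ_le_succ h)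
        rw [show List.drop (['.'] : List Char).length ('.' :: rest) = rest from rfl]
        rw [this]
        simp [pvSplit]
        cases hp : pvSplit rest with
        | nil => exact absurd hp (pvSplit_ne_nil rest)
        | cons a as => simp
      · have hpre : List.isPrefixOf ['.'] (c :: rest) = false := by
          simp [List.isPrefixOf]
          exact fun hh => absurd hh.symm hc
        rw [if_neg (by simp [hpre])]
        rw [ih rest (c :: cur) acc (Nat.le_of_succ_le_succ h)]
        simp only [pvSplit, if_neg hc]
        cases hp : pvSplit rest with
        | nil => exact absurd hp (pvSplit_ne_nil rest)
        | cons a as => simp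

lemma splitOn_eq_pvSplit (s : List Char) :
    PySem.Chars.splitOn s ['.'] = pvSplit s := by
  have h := splitOn_go_eq (s.length + 1) s [] [] (by omega)
  rw [show PySem.Chars.splitOn s ['.'] = PySem.Chars.splitOn.go ['.'] (s.length + 1) s [] [] from rfl, h]
  cases hp : pvSplit s with
  | nil => exact absurd hp (pvSplit_ne_nil s)
  | cons a as => simp

-- the check A performs on the label currently being read by B, phrased through B's state:
-- lab chars already read (all valid, not starting with '-', lab ≤ 63), prevH = "last read char was '-'"
def okCont (lab : Nat) (prevH : Bool) (l : List Char) : Bool :=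
  decide (lab + l.length ≠ 0) && decide (lab + l.length ≤ 63) &&
  l.all (fun c => PySem.Chars.isalnum c || c == '-') &&
  (if lab = 0 then !(l.head? == some '-') else true) &&
  (match l.getLast? with
   | some c => !(c == '-')
   | none => !prevH)

lemma startswith_hyphen (l : List Char) :
    PySem.Chars.startswith l ['-'] = (l.head? == some '-') := by
  cases l with
  | nil =>
    rw [show PySem.Chars.startswith [] ['-'] = false from by
      rw [Bool.eq_false_iff, Ne, PySem.Chars.startswith_iff]; simp]
    simp
  | cons c cs =>
    by_cases h : c = '-'
    · subst h
      simp only [List.head?_cons]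
      rw [show PySem.Chars.startswith ('-' :: cs) ['-'] = true from by
        rw [PySem.Chars.startswith_iff]; exact ⟨cs, rfl⟩]
      simp
    · rw [show PySem.Chars.startswith (c :: cs) ['-'] = false from by
        rw [Bool.eq_false_iff]
        intro hh
        rw [PySem.Chars.startswith_iff] at hh
        obtain ⟨t, ht⟩ := hh
        simp at ht
        exact h ht.1.symm]
      simp [h]

lemma endswith_hyphen (l : List Char) :
    PySem.Chars.endswith l ['-'] = (l.getLast? == some '-') := by
  by_cases h : l.getLast? = some '-'
  · rw [h]
    obtain ⟨t, ht⟩ := List.getLast?_eq_some_iff.mp h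
    rw [show PySem.Chars.endswith l ['-'] = true from by
      rw [PySem.Chars.endswith_iff]; exact ⟨t, ht.symm⟩]
    simp
  · rw [show PySem.Chars.endswith l ['-'] = false from by
      rw [Bool.eq_false_iff]
      intro hh
      rw [PySem.Chars.endswith_iff] at hh
      obtain ⟨t, ht⟩ := hh
      exact h (ht ▸ (by simp : (t ++ ['-']).getLast? = some '-'))]
    simp [h]

lemma okCont_cons (c d : Char) (cs : List Char) (hl : (c :: cs).getLast? = some d) :
    okCont 0 false (c :: cs)
      = (decide (cs.length + 1 ≤ 63) && ((c :: cs).all (fun x => PySem.Chars.isalnum x || x == '-')) && !(c == '-') && !(d == '-')) := by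
  simp [okCont, hl]

lemma getLast?_cons_append (c d : Char) (t : List Char) :
    (c :: (t ++ [d])).getLast? = some d := by
  induction t generalizing c with
  | nil => rfl
  | cons x xs ih2 => exact ih2 x

-- one step of A's loop equals the fresh-label check
lemma loopA_cons (l : List Char) (ls : List (List Char)) :
    validate_domain_loop (l :: ls) = (okCont 0 false l && validate_domain_loop ls) := by
  cases l with
  | nil => simp [validate_domain_loop, okCont]
  | cons c cs =>
    cases hl : (c :: cs).getLast? with
    | none => simp at hl
    | some d =>
      simp only [validate_domain_loop, okCont_cons c d cs hl]
      by_cases h1 : (c :: cs) = [] ∨ 63 < PySem.Chars.len (c :: cs)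
      · rw [if_pos h1]
        rcases h1 with h | h
        · simp at h
        · rw [PySem.Chars.len_eq] at h
          simp only [List.length_cons] at h
          have hn : 63 < cs.length + 1 := by exact_mod_cast h
          simp [show ¬ (cs.length + 1 ≤ 63) from by omega]
      · rw [if_neg h1]
        by_cases h2 : (!((c :: cs).all fun x => PySem.Chars.isalnum x || x == '-')) = true
        · rw [if_pos h2]
          have hall : ((c :: cs).all fun x => PySem.Chars.isalnum x || x == '-') = false := by
            cases hx : ((c :: cs).all fun x => PySem.Chars.isalnum x || x == '-') with
            | false => rfl
            | true => exact absurd h2 (by simp [hx])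
          simp [hall]
        · rw [if_neg h2]
          have hall : ((c :: cs).all fun x => PySem.Chars.isalnum x || x == '-') = true := by
            cases hx : ((c :: cs).all fun x => PySem.Chars.isalnum x || x == '-') with
            | true => rfl
            | false => exact absurd (by simp [hx]) h2
          by_cases h3 : (PySem.Chars.startswith (c :: cs) ['-'] || PySem.Chars.endswith (c :: cs) ['-']) = true
          · rw [if_pos h3]
            rw [startswith_hyphen, endswith_hyphen, hl] at h3
            simp only [List.head?_cons] at h3
            rcases Bool.or_eq_true_iff.mp h3 with h | h
            · have hc : c = '-' := by simpa using h
              simp [hc]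
            · have hd : d = '-' := by simpa using h
              simp [hd, hall]
          · rw [if_neg h3]
            rw [startswith_hyphen, endswith_hyphen, hl] at h3
            simp only [List.head?_cons, Bool.or_eq_true_iff, not_or] at h3
            have hc : ¬ c = '-' := by simpa using h3.1
            have hd : ¬ d = '-' := by simpa using h3.2
            rw [not_or] at h1
            have hlen : cs.length + 1 ≤ 63 := by
              have := h1.2
              rw [PySem.Chars.len_eq] at this
              simp only [List.length_cons] at this
              exact_mod_cast Int.not_lt.mp this
            simp [hall, hc, hd, hlen]

-- the key invariant: B's loop from state (lab, prev) computes A's remaining check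
lemma loopB_eq (cs : List Char) (lab : Nat) (prev : Option Char)
    (hlab : lab ≤ 63) (hprev : lab = 0 → prev ≠ some '-') :
    validate_domain_alt_loop cs lab prev
      = (match pvSplit cs with
         | [] => true -- unreachable
         | l :: ls => okCont lab (prev == some '-') l && validate_domain_loop ls) := by
  induction cs generalizing lab prev with
  | nil =>
    simp only [pvSplit, validate_domain_alt_loop, okCont]
    by_cases h0 : lab = 0
    · simp [h0, validate_domain_loop]
    · simp [h0, validate_domain_loop, hlab]
  | cons c cs ih =>
    by_cases hc : c = '.'
    · subst hc
      rw [show pvSplit ('.' :: cs) = [] :: pvSplit cs from by simp [pvSplit]]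
      simp only [validate_domain_alt_loop]
      rw [if_pos (show (('.' == '.') = true) from by decide)]
      by_cases h0 : lab = 0
      · rw [if_pos (by simp [h0])]
        simp [okCont, h0]
      · by_cases hp : (prev == some '-') = true
        · rw [if_pos (by simp [hp])]
          simp [okCont, h0, hp]
        · rw [if_neg (by simp [h0, hp])]
          rw [ih 0 (some '.') (by omega) (by simp)]
          rw [show ((some '.' : Option Char) == some '-') = false from by decide]
          have hok : okCont lab (prev == some '-') [] = true := by
            simp [okCont, h0, hlab, eq_false_of_ne_true hp]
          cases hps : pvSplit cs with
          | nil => exact absurd hps (pvSplit_ne_nil cs)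
          | cons a as =>
            simp [hok, loopA_cons]
    · rw [show pvSplit (c :: cs) = (pvSplit cs).modifyHead (c :: ·) from by simp [pvSplit, hc]]
      cases hps : pvSplit cs with
      | nil => exact absurd hps (pvSplit_ne_nil cs)
      | cons l ls =>
        simp only [List.modifyHead_cons]
        simp only [validate_domain_alt_loop]
        rw [if_neg (by simp [hc])]
        by_cases hv : (PySem.Chars.isalnum c || c == '-') = true
        · rw [if_neg (by simp [hv])]
          by_cases hld : (lab == 0 && c == '-') = true
          · rw [if_pos hld]
            simp only [Bool.and_eq_true, beq_iff_eq] at hld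
            simp [okCont, hld.1, hld.2]
          · rw [if_neg hld]
            by_cases h63 : 63 < lab + 1
            · rw [if_pos h63]
              have hn : ¬ (lab + (l.length + 1) ≤ 63) := by omega
              simp [okCont, hn]
            · rw [if_neg h63]
              rw [ih (lab + 1) (some c) (by omega) (by omega)]
              rw [hps]
              -- okCont over c :: l collapses to okCont from the advanced state
              simp only [okCont, List.all_cons, hv, Bool.true_and, List.length_cons,
                List.head?_cons]
              cases hll : l.getLast? with
              | none =>
                have hl0 : l = [] := by
                  cases l with
                  | nil => rfl
                  | cons x xs => simp at hll
                subst hl0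
                by_cases h0 : lab = 0
                · have hcc : ¬ c = '-' := fun hcc => hld (by simp [h0, hcc])
                  have hcb : (c == '-') = false := by simp [hcc]
                  simp [h0, hcb]
                · simp [h0]
              | some d =>
                obtain ⟨t, ht⟩ := List.getLast?_eq_some_iff.mp hll
                subst ht
                by_cases h0 : lab = 0
                · have hcc : ¬ c = '-' := fun hcc => hld (by simp [h0, hcc])
                  have hcb : (c == '-') = false := by simp [hcc]
                  simp [h0, hcb, getLast?_cons_append, Nat.add_comm]
                · simp [h0, getLast?_cons_append, Nat.add_comm, Nat.add_assoc]
        · rw [if_pos (by simp [hv])]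
          have hall : (c :: l).all (fun c => PySem.Chars.isalnum c || c == '-') = false := by
            simp [List.all_cons, Bool.eq_false_iff.mpr hv]
          simp [okCont, hall]

-- ===== VERDICT (by name: the statement is the Claim_ definition above) =====
theorem validate_domain_spec : Claim_equal_validate_domain := by
  intro domain _
  unfold Spec_validate_domain validate_domain validate_domain_alt
  by_cases hg : domain.toList = [] ∨ 253 < PySem.Str.len domain
  · rw [if_pos hg, if_pos hg]
  · rw [if_neg hg, if_neg hg]
    rw [splitOn_eq_pvSplit, loopB_eq domain.toList 0 none (by omega) (by simp)]
    cases hps : pvSplit domain.toList with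
    | nil => exact absurd hps (pvSplit_ne_nil domain.toList)
    | cons l ls =>
      rw [loopA_cons]
      simp
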